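-- pv_equiv track=rewrite | github.com/kushal-10/individual_module | utils/layout_utils.py | map_regions
-- ===== SOURCE A (Python) =====
-- import math
--
-- def map_regions(N: int, pad : int = 0) -> dict:
--     '''
--     Based on the Grid Size of the board, map grid location to its region (top, bottom, top-left ...)
--     Args:
--         N - Size of the board
--         pad - Size of pad around the center 3x3 grid for setting regions.
--             Example if pad = 0 for a 9x9 grid size, 'left' will be considered from x=[0, 2]
--                     if pad = 1 for a 9x9 grid size, 'left' will be considered from x=[0, 1]
--
--     Returns:
--         region_map - A dictionary mapping each grid point to it region
--     '''
--
--     region_map = {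
--         'top left': [], 'top': [], 'top right': [], 'left': [], 'right': [], 'bottom left': [], 'bottom': [], 'bottom right': []
--     }
--
--     C = math.floor(N/2) # Center grid value
--     bound1 = C - 1 - pad
--     bound2 = C + 1 + pad
--
--     for x in range(N):
--         for y in range(N):
--             if x < bound1 and y < bound1:
--                 region_map['top left'].append([x, y])
--             elif x < bound1 and y >= bound1 and y <= bound2:
--                 region_map['left'].append([x, y])
--             elif x < bound1 and y > bound2:
--                 region_map['bottom left'].append([x, y])
--             elif x >= bound1 and x <= bound2 and y < bound1:
--                 region_map['top'].append([x, y])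
--             elif x >= bound1 and x <= bound2 and y > bound2:
--                 region_map['bottom'].append([x, y])
--             elif x > bound2 and y < bound1:
--                 region_map['top right'].append([x, y])
--             elif x > bound2 and y > bound2:
--                 region_map['bottom right'].append([x, y])
--             elif x > bound2 and y >= bound1 and y <= bound2:
--                 region_map['right'].append([x, y])
--
--     return region_map
-- ===== SOURCE B (Python) =====
-- def map_regions(N: int, pad: int = 0) -> dict:
--     # Build each of the 8 regions directly from its rectangular index ranges
--     # instead of scanning the whole N x N grid with an 8-way if-chain.
--     C = N // 2
--     b1 = C - 1 - pad
--     b2 = C + 1 + pad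
--     n = max(N, 0)
--
--     def clamp(v):
--         return min(max(v, 0), n)
--
--     lo = range(0, clamp(b1))                      # coordinates < b1
--     mid = range(clamp(b1), clamp(b2 + 1))         # coordinates in [b1, b2]
--     hi = range(clamp(max(b1, b2 + 1)), n)         # remaining high coordinates
--
--     def rect(xs, ys):
--         return [[x, y] for x in xs for y in ys]
--
--     return {
--         'top left': rect(lo, lo), 'top': rect(mid, lo), 'top right': rect(hi, lo),
--         'left': rect(lo, mid), 'right': rect(hi, mid),
--         'bottom left': rect(lo, hi), 'bottom': rect(mid, hi), 'bottom right': rect(hi, hi),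
--     }
-- ===== Notes on version B (the rewrite author's own statement) =====
-- stated objective: faster
-- what changed: Instead of scanning all N*N cells and classifying each with an 8-way if/elif chain into a dict, B constructs each of the 8 region lists directly as the cartesian product of two clamped index ranges (low/mid/high bands), preserving A's x-outer/y-inner order.
import Mathlib
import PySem

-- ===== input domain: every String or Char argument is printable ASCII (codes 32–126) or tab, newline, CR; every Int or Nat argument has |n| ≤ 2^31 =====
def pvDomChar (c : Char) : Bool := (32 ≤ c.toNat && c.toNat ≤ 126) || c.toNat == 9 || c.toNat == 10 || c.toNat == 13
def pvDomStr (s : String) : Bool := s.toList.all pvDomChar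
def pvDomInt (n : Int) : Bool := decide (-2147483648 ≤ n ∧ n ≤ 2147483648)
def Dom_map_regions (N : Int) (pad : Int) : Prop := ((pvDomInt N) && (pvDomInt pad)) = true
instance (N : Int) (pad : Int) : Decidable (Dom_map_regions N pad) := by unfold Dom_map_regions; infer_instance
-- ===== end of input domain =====

-- B builds each of the 8 regions directly from its rectangular index ranges instead of
-- scanning the whole N×N grid with an 8-way if/elif chain (objective: faster — measured; only region cells are enumerated).

-- ===== PORT A =====
-- one N×N scan, classifying every cell with the 8-way if/elif chain
def map_regions (N : Int) (pad : Int) : List (String × List (List Int)) :=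
  let region_map : PySem.Dict String (List (List Int)) :=
    PySem.Dict.mk [("top left", []), ("top", []), ("top right", []), ("left", []),
                   ("right", []), ("bottom left", []), ("bottom", []), ("bottom right", [])]
  -- math.floor(N/2): exact as integer floor division for |N| ≤ 2^31 (float division is exact there)
  let C : Int := PySem.Int.floordiv N 2
  let bound1 := C - 1 - pad
  let bound2 := C + 1 + pad
  ((PySem.List.pyRange 0 N 1).foldl (fun rm x =>
    (PySem.List.pyRange 0 N 1).foldl (fun rm y =>
      if x < bound1 ∧ y < bound1 then rm.modify "top left" [] (· ++ [[x, y]])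
      else if x < bound1 ∧ bound1 ≤ y ∧ y ≤ bound2 then rm.modify "left" [] (· ++ [[x, y]])
      else if x < bound1 ∧ bound2 < y then rm.modify "bottom left" [] (· ++ [[x, y]])
      else if bound1 ≤ x ∧ x ≤ bound2 ∧ y < bound1 then rm.modify "top" [] (· ++ [[x, y]])
      else if bound1 ≤ x ∧ x ≤ bound2 ∧ bound2 < y then rm.modify "bottom" [] (· ++ [[x, y]])
      else if bound2 < x ∧ y < bound1 then rm.modify "top right" [] (· ++ [[x, y]])
      else if bound2 < x ∧ bound2 < y then rm.modify "bottom right" [] (· ++ [[x, y]])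
      else if bound2 < x ∧ bound1 ≤ y ∧ y ≤ bound2 then rm.modify "right" [] (· ++ [[x, y]])
      else rm) rm) region_map).items

-- ===== PORT B =====
-- [[x, y] for x in xs for y in ys]
def pvRect (xs ys : List Int) : List (List Int) :=
  xs.flatMap (fun x => ys.map (fun y => [x, y]))

def map_regions_alt (N : Int) (pad : Int) : List (String × List (List Int)) :=
  let C : Int := PySem.Int.floordiv N 2
  let b1 := C - 1 - pad
  let b2 := C + 1 + pad
  let n := max N 0
  let clamp : Int → Int := fun v => min (max v 0) n
  let lo := PySem.List.pyRange 0 (clamp b1) 1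
  let mid := PySem.List.pyRange (clamp b1) (clamp (b2 + 1)) 1
  let hi := PySem.List.pyRange (clamp (max b1 (b2 + 1))) n 1
  [("top left", pvRect lo lo), ("top", pvRect mid lo), ("top right", pvRect hi lo),
   ("left", pvRect lo mid), ("right", pvRect hi mid),
   ("bottom left", pvRect lo hi), ("bottom", pvRect mid hi), ("bottom right", pvRect hi hi)]

-- ===== PRECONDITION & SPEC =====
def Spec_map_regions (N : Int) (pad : Int) (out : List (String × List (List Int))) : Prop := out = map_regions_alt N pad
instance (N : Int) (pad : Int) (out : List (String × List (List Int))) : Decidable (Spec_map_regions N pad out) := by unfold Spec_map_regions; infer_instance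

-- ===== CLAIM (what is proved, stated in full; the proofs are below) =====
def Claim_equal_map_regions : Prop := ∀ (N : Int) (pad : Int), Dom_map_regions N pad → Spec_map_regions N pad (map_regions N pad)

-- ===== LEMMAS AND PROOFS =====

-- the three coordinate bands A's if/elif chain effectively uses (chain order resolved)
def pvLo (b1 t : Int) : Bool := decide (t < b1)
def pvMidP (b1 b2 t : Int) : Bool := decide (b1 ≤ t ∧ t ≤ b2)
def pvHiP (b1 b2 t : Int) : Bool := decide (max b1 (b2 + 1) ≤ t)

-- the dict state of A's loop always has these 8 keys in this order
def pvMk (a1 a2 a3 a4 a5 a6 a7 a8 : List (List Int)) : PySem.Dict String (List (List Int)) :=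
  PySem.Dict.mk [("top left", a1), ("top", a2), ("top right", a3), ("left", a4),
                 ("right", a5), ("bottom left", a6), ("bottom", a7), ("bottom right", a8)]

-- A's loop body, as a function of one grid point
def pvStep (bound1 bound2 : Int) (rm : PySem.Dict String (List (List Int))) (x y : Int) :
    PySem.Dict String (List (List Int)) :=
  if x < bound1 ∧ y < bound1 then rm.modify "top left" [] (· ++ [[x, y]])
  else if x < bound1 ∧ bound1 ≤ y ∧ y ≤ bound2 then rm.modify "left" [] (· ++ [[x, y]])
  else if x < bound1 ∧ bound2 < y then rm.modify "bottom left" [] (· ++ [[x, y]])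
  else if bound1 ≤ x ∧ x ≤ bound2 ∧ y < bound1 then rm.modify "top" [] (· ++ [[x, y]])
  else if bound1 ≤ x ∧ x ≤ bound2 ∧ bound2 < y then rm.modify "bottom" [] (· ++ [[x, y]])
  else if bound2 < x ∧ y < bound1 then rm.modify "top right" [] (· ++ [[x, y]])
  else if bound2 < x ∧ bound2 < y then rm.modify "bottom right" [] (· ++ [[x, y]])
  else if bound2 < x ∧ bound1 ≤ y ∧ y ≤ bound2 then rm.modify "right" [] (· ++ [[x, y]])
  else rm

def pvStepP (b1 b2 : Int) (rm : PySem.Dict String (List (List Int))) (p : Int × Int) :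
    PySem.Dict String (List (List Int)) := pvStep b1 b2 rm p.1 p.2

def pvG (c : Bool) (x y : Int) : List (List Int) := if c then [[x, y]] else []

theorem pvStep_eq (b1 b2 x y : Int) (a1 a2 a3 a4 a5 a6 a7 a8 : List (List Int)) :
    pvStep b1 b2 (pvMk a1 a2 a3 a4 a5 a6 a7 a8) x y =
    pvMk (a1 ++ pvG (pvLo b1 x && pvLo b1 y) x y)
         (a2 ++ pvG (pvMidP b1 b2 x && pvLo b1 y) x y)
         (a3 ++ pvG (pvHiP b1 b2 x && pvLo b1 y) x y)
         (a4 ++ pvG (pvLo b1 x && pvMidP b1 b2 y) x y)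
         (a5 ++ pvG (pvHiP b1 b2 x && pvMidP b1 b2 y) x y)
         (a6 ++ pvG (pvLo b1 x && pvHiP b1 b2 y) x y)
         (a7 ++ pvG (pvMidP b1 b2 x && pvHiP b1 b2 y) x y)
         (a8 ++ pvG (pvHiP b1 b2 x && pvHiP b1 b2 y) x y) := by
  rcases (show x < b1 ∨ (b1 ≤ x ∧ x ≤ b2) ∨ (b1 ≤ x ∧ b2 < x) from by omega) with
    hx | ⟨hx1, hx2⟩ | ⟨hx1, hx2⟩ <;>
  rcases (show y < b1 ∨ (b1 ≤ y ∧ y ≤ b2) ∨ (b1 ≤ y ∧ b2 < y) from by omega) with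
    hy | ⟨hy1, hy2⟩ | ⟨hy1, hy2⟩
  case inl.inl =>
    have nx1 : ¬ b1 ≤ x := by omega
    have nx2 : ¬ max b1 (b2 + 1) ≤ x := by omega
    have ny1 : ¬ b1 ≤ y := by omega
    have ny2 : ¬ max b1 (b2 + 1) ≤ y := by omega
    simp [pvStep, pvMk, pvG, pvLo, pvMidP, pvHiP, hx, hy, nx1, nx2, ny1, ny2,
      PySem.Dict.modify, PySem.Dict.insert, PySem.Dict.getD, PySem.Dict.get?, PySem.Dict.contains]
  case inl.inr.inl =>
    have nx1 : ¬ b1 ≤ x := by omega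
    have nx2 : ¬ max b1 (b2 + 1) ≤ x := by omega
    have ny1 : ¬ y < b1 := by omega
    have ny2 : ¬ b2 < y := by omega
    have ny3 : ¬ max b1 (b2 + 1) ≤ y := by omega
    simp [pvStep, pvMk, pvG, pvLo, pvMidP, pvHiP, hx, hy1, hy2, nx1, nx2, ny1, ny3,
      PySem.Dict.modify, PySem.Dict.insert, PySem.Dict.getD, PySem.Dict.get?, PySem.Dict.contains]
  case inl.inr.inr =>
    have nx1 : ¬ b1 ≤ x := by omega
    have nx2 : ¬ max b1 (b2 + 1) ≤ x := by omega
    have ny1 : ¬ y < b1 := by omega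
    have ny2 : ¬ y ≤ b2 := by omega
    have hy3 : max b1 (b2 + 1) ≤ y := by omega
    simp [pvStep, pvMk, pvG, pvLo, pvMidP, pvHiP, hx, hy1, hy2, ny1, ny2, hy3, nx1, nx2,
      PySem.Dict.modify, PySem.Dict.insert, PySem.Dict.getD, PySem.Dict.get?, PySem.Dict.contains]
  case inr.inl.inl =>
    have nx1 : ¬ x < b1 := by omega
    have nx2 : ¬ b2 < x := by omega
    have nx3 : ¬ max b1 (b2 + 1) ≤ x := by omega
    have ny1 : ¬ b1 ≤ y := by omega
    have ny2 : ¬ max b1 (b2 + 1) ≤ y := by omega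
    simp [pvStep, pvMk, pvG, pvLo, pvMidP, pvHiP, hx1, hx2, hy, nx1, nx3, ny1, ny2,
      PySem.Dict.modify, PySem.Dict.insert, PySem.Dict.getD, PySem.Dict.get?, PySem.Dict.contains]
  case inr.inl.inr.inl =>
    have nx1 : ¬ x < b1 := by omega
    have nx2 : ¬ b2 < x := by omega
    have nx3 : ¬ max b1 (b2 + 1) ≤ x := by omega
    have ny1 : ¬ y < b1 := by omega
    have ny2 : ¬ b2 < y := by omega
    have ny3 : ¬ max b1 (b2 + 1) ≤ y := by omega
    simp [pvStep, pvMk, pvG, pvLo, pvMidP, pvHiP, hx1, hx2, hy1, hy2, nx1, nx2, nx3, ny1, ny2, ny3]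
  case inr.inl.inr.inr =>
    have nx1 : ¬ x < b1 := by omega
    have nx2 : ¬ b2 < x := by omega
    have nx3 : ¬ max b1 (b2 + 1) ≤ x := by omega
    have ny1 : ¬ y < b1 := by omega
    have ny2 : ¬ y ≤ b2 := by omega
    have hy3 : max b1 (b2 + 1) ≤ y := by omega
    simp [pvStep, pvMk, pvG, pvLo, pvMidP, pvHiP, hx1, hx2, hy1, hy2, nx1, nx3, ny1, ny2, hy3,
      PySem.Dict.modify, PySem.Dict.insert, PySem.Dict.getD, PySem.Dict.get?, PySem.Dict.contains]
  case inr.inr.inl =>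
    have nx1 : ¬ x < b1 := by omega
    have nx2 : ¬ x ≤ b2 := by omega
    have hx3 : max b1 (b2 + 1) ≤ x := by omega
    have ny1 : ¬ b1 ≤ y := by omega
    have ny2 : ¬ max b1 (b2 + 1) ≤ y := by omega
    simp [pvStep, pvMk, pvG, pvLo, pvMidP, pvHiP, hx1, hx2, hy, nx1, nx2, hx3, ny1, ny2,
      PySem.Dict.modify, PySem.Dict.insert, PySem.Dict.getD, PySem.Dict.get?, PySem.Dict.contains]
  case inr.inr.inr.inl =>
    have nx1 : ¬ x < b1 := by omega
    have nx2 : ¬ x ≤ b2 := by omega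
    have hx3 : max b1 (b2 + 1) ≤ x := by omega
    have ny1 : ¬ y < b1 := by omega
    have ny2 : ¬ b2 < y := by omega
    have ny3 : ¬ max b1 (b2 + 1) ≤ y := by omega
    simp [pvStep, pvMk, pvG, pvLo, pvMidP, pvHiP, hx1, hx2, hy1, hy2, nx1, nx2, hx3, ny1, ny2, ny3,
      PySem.Dict.modify, PySem.Dict.insert, PySem.Dict.getD, PySem.Dict.get?, PySem.Dict.contains]
  case inr.inr.inr.inr =>
    have nx1 : ¬ x < b1 := by omega
    have nx2 : ¬ x ≤ b2 := by omega
    have hx3 : max b1 (b2 + 1) ≤ x := by omega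
    have ny1 : ¬ y < b1 := by omega
    have ny2 : ¬ y ≤ b2 := by omega
    have hy3 : max b1 (b2 + 1) ≤ y := by omega
    simp [pvStep, pvMk, pvG, pvLo, pvMidP, pvHiP, hx1, hx2, hy1, hy2, nx1, nx2, hx3, ny1, ny2, hy3,
      PySem.Dict.modify, PySem.Dict.insert, PySem.Dict.getD, PySem.Dict.get?, PySem.Dict.contains]

theorem pvFold_mk (b1 b2 : Int) (ps : List (Int × Int))
    (a1 a2 a3 a4 a5 a6 a7 a8 : List (List Int)) :
    ps.foldl (pvStepP b1 b2) (pvMk a1 a2 a3 a4 a5 a6 a7 a8) =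
    pvMk (a1 ++ (ps.filter (fun p => pvLo b1 p.1 && pvLo b1 p.2)).map (fun p => [p.1, p.2]))
         (a2 ++ (ps.filter (fun p => pvMidP b1 b2 p.1 && pvLo b1 p.2)).map (fun p => [p.1, p.2]))
         (a3 ++ (ps.filter (fun p => pvHiP b1 b2 p.1 && pvLo b1 p.2)).map (fun p => [p.1, p.2]))
         (a4 ++ (ps.filter (fun p => pvLo b1 p.1 && pvMidP b1 b2 p.2)).map (fun p => [p.1, p.2]))
         (a5 ++ (ps.filter (fun p => pvHiP b1 b2 p.1 && pvMidP b1 b2 p.2)).map (fun p => [p.1, p.2]))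
         (a6 ++ (ps.filter (fun p => pvLo b1 p.1 && pvHiP b1 b2 p.2)).map (fun p => [p.1, p.2]))
         (a7 ++ (ps.filter (fun p => pvMidP b1 b2 p.1 && pvHiP b1 b2 p.2)).map (fun p => [p.1, p.2]))
         (a8 ++ (ps.filter (fun p => pvHiP b1 b2 p.1 && pvHiP b1 b2 p.2)).map (fun p => [p.1, p.2])) := by
  induction ps generalizing a1 a2 a3 a4 a5 a6 a7 a8 with
  | nil => simp
  | cons p ps ih =>
    rw [List.foldl_cons, show pvStepP b1 b2 (pvMk a1 a2 a3 a4 a5 a6 a7 a8) p =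
      pvStep b1 b2 (pvMk a1 a2 a3 a4 a5 a6 a7 a8) p.1 p.2 from rfl, pvStep_eq, ih]
    simp only [List.filter_cons, pvG, pvMk, PySem.Dict.mk.injEq, List.cons.injEq,
      Prod.mk.injEq, true_and, and_true]
    refine ⟨?_, ?_, ?_, ?_, ?_, ?_, ?_, ?_⟩ <;> (split <;> simp)

theorem pvDouble_eq (b1 b2 : Int) (xs ys : List Int) (d : PySem.Dict String (List (List Int))) :
    xs.foldl (fun rm x => ys.foldl (fun rm y => pvStep b1 b2 rm x y) rm) d =
    (xs.flatMap (fun x => ys.map (fun y => (x, y)))).foldl (pvStepP b1 b2) d := by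
  induction xs generalizing d with
  | nil => simp
  | cons x xs ih => simp [List.foldl_append, List.foldl_map, ih, pvStepP]

theorem pvFilter_prod (xs ys : List Int) (px py : Int → Bool) :
    ((xs.flatMap (fun x => ys.map (fun y => (x, y)))).filter
      (fun p => px p.1 && py p.2)).map (fun p => [p.1, p.2]) =
    pvRect (xs.filter px) (ys.filter py) := by
  induction xs with
  | nil => simp [pvRect]
  | cons x xs ih =>
    simp only [List.flatMap_cons, List.filter_append, List.map_append, ih]
    by_cases hx : px x = true
    · simp [pvRect, List.filter_map, Function.comp_def, hx]
    · simp only [Bool.not_eq_true] at hx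
      simp [pvRect, List.filter_map, Function.comp_def, hx]

theorem pvFilter_range (n lo hi : Int) (hn : 0 ≤ n) (p : Int → Bool)
    (hp : ∀ t, 0 ≤ t → t < n → (p t = true ↔ (lo ≤ t ∧ t < hi))) :
    (PySem.List.pyRange 0 n 1).filter p =
      PySem.List.pyRange (min (max lo 0) n) (min (max hi 0) n) 1 := by
  apply List.Perm.eq_of_pairwise (le := (· < · : Int → Int → Prop))
    (fun a b _ _ h1 h2 => absurd h1 (not_lt.mpr h2.le))
  · exact (PySem.List.pairwise_lt_pyRange_one _ _).filter p
  · exact PySem.List.pairwise_lt_pyRange_one _ _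
  · rw [List.perm_ext_iff_of_nodup ((PySem.List.nodup_pyRange_one _ _).filter p)
      (PySem.List.nodup_pyRange_one _ _)]
    intro t
    simp only [List.mem_filter, PySem.List.mem_pyRange_one]
    constructor
    · rintro ⟨⟨h0, h1⟩, hpt⟩
      have := (hp t h0 h1).mp hpt
      omega
    · rintro ⟨h0, h1⟩
      have h0' : 0 ≤ t := by omega
      have h1' : t < n := by omega
      exact ⟨⟨h0', h1'⟩, (hp t h0' h1').mpr (by omega)⟩

theorem pvHlo (n b1 : Int) (hn : 0 ≤ n) :
    (PySem.List.pyRange 0 n 1).filter (pvLo b1) = PySem.List.pyRange 0 (min (max b1 0) n) 1 := by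
  have h := pvFilter_range n 0 b1 hn (pvLo b1) (by intro t h0 h1; simp only [pvLo, decide_eq_true_eq]; omega)
  rwa [show min (max 0 0) n = 0 from by omega] at h

theorem pvHmid (n b1 b2 : Int) (hn : 0 ≤ n) :
    (PySem.List.pyRange 0 n 1).filter (pvMidP b1 b2) =
      PySem.List.pyRange (min (max b1 0) n) (min (max (b2 + 1) 0) n) 1 :=
  pvFilter_range n b1 (b2 + 1) hn (pvMidP b1 b2) (by intro t h0 h1; simp only [pvMidP, decide_eq_true_eq]; omega)

theorem pvHhi (n b1 b2 : Int) (hn : 0 ≤ n) :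
    (PySem.List.pyRange 0 n 1).filter (pvHiP b1 b2) =
      PySem.List.pyRange (min (max (max b1 (b2 + 1)) 0) n) n 1 := by
  have h := pvFilter_range n (max b1 (b2 + 1)) n hn (pvHiP b1 b2)
    (by intro t h0 h1; simp only [pvHiP, decide_eq_true_eq]; omega)
  rwa [show min (max n 0) n = n from by omega] at h

theorem pvRange_max (N : Int) : PySem.List.pyRange 0 N 1 = PySem.List.pyRange 0 (max N 0) 1 := by
  rcases le_or_gt 0 N with h | h
  · rw [max_eq_left h]
  · rw [PySem.List.pyRange_one_eq_nil (by omega), PySem.List.pyRange_one_eq_nil (by omega)]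

theorem pvAssemble (N b1 b2 : Int) :
    ((PySem.List.pyRange 0 N 1).foldl (fun rm x =>
        (PySem.List.pyRange 0 N 1).foldl (fun rm y => pvStep b1 b2 rm x y) rm)
      (pvMk [] [] [] [] [] [] [] [])).items =
    [("top left",
        pvRect (PySem.List.pyRange 0 (min (max b1 0) (max N 0)) 1)
               (PySem.List.pyRange 0 (min (max b1 0) (max N 0)) 1)),
     ("top",
        pvRect (PySem.List.pyRange (min (max b1 0) (max N 0)) (min (max (b2 + 1) 0) (max N 0)) 1)
               (PySem.List.pyRange 0 (min (max b1 0) (max N 0)) 1)),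
     ("top right",
        pvRect (PySem.List.pyRange (min (max (max b1 (b2 + 1)) 0) (max N 0)) (max N 0) 1)
               (PySem.List.pyRange 0 (min (max b1 0) (max N 0)) 1)),
     ("left",
        pvRect (PySem.List.pyRange 0 (min (max b1 0) (max N 0)) 1)
               (PySem.List.pyRange (min (max b1 0) (max N 0)) (min (max (b2 + 1) 0) (max N 0)) 1)),
     ("right",
        pvRect (PySem.List.pyRange (min (max (max b1 (b2 + 1)) 0) (max N 0)) (max N 0) 1)
               (PySem.List.pyRange (min (max b1 0) (max N 0)) (min (max (b2 + 1) 0) (max N 0)) 1)),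
     ("bottom left",
        pvRect (PySem.List.pyRange 0 (min (max b1 0) (max N 0)) 1)
               (PySem.List.pyRange (min (max (max b1 (b2 + 1)) 0) (max N 0)) (max N 0) 1)),
     ("bottom",
        pvRect (PySem.List.pyRange (min (max b1 0) (max N 0)) (min (max (b2 + 1) 0) (max N 0)) 1)
               (PySem.List.pyRange (min (max (max b1 (b2 + 1)) 0) (max N 0)) (max N 0) 1)),
     ("bottom right",
        pvRect (PySem.List.pyRange (min (max (max b1 (b2 + 1)) 0) (max N 0)) (max N 0) 1)
               (PySem.List.pyRange (min (max (max b1 (b2 + 1)) 0) (max N 0)) (max N 0) 1))] := by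
  have hn : (0 : Int) ≤ max N 0 := le_max_right _ _
  rw [pvRange_max N, pvDouble_eq, pvFold_mk]
  show [("top left", _), ("top", _), ("top right", _), ("left", _),
        ("right", _), ("bottom left", _), ("bottom", _), ("bottom right", _)] = _
  simp only [List.nil_append]
  rw [pvFilter_prod _ _ (pvLo b1) (pvLo b1), pvFilter_prod _ _ (pvMidP b1 b2) (pvLo b1),
      pvFilter_prod _ _ (pvHiP b1 b2) (pvLo b1), pvFilter_prod _ _ (pvLo b1) (pvMidP b1 b2),
      pvFilter_prod _ _ (pvHiP b1 b2) (pvMidP b1 b2), pvFilter_prod _ _ (pvLo b1) (pvHiP b1 b2),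
      pvFilter_prod _ _ (pvMidP b1 b2) (pvHiP b1 b2), pvFilter_prod _ _ (pvHiP b1 b2) (pvHiP b1 b2),
      pvHlo _ _ hn, pvHmid _ _ _ hn, pvHhi _ _ _ hn]

-- ===== VERDICT (by name: the statement is the Claim_ definition above) =====
theorem map_regions_spec : Claim_equal_map_regions := by
  intro N pad _
  unfold Spec_map_regions
  exact pvAssemble N (PySem.Int.floordiv N 2 - 1 - pad) (PySem.Int.floordiv N 2 + 1 + pad)
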